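-- pv_equiv track=rewrite | github.com/takuron1996/python_algorithm | application/algorithm/komachi_calculation/arithmetic_processing.py | calc_mul_div
-- ===== SOURCE A (Python) =====
-- from enum import IntEnum
--
-- class Operator(IntEnum):
--     """演算子
--
--     Attributes:
--         EMPTY: 空白
--         ADD: 加算演算子
--         SUB: 減算演算子
--         MUL: 乗算演算子
--         DIV: 除算演算子
--     """
--
--     EMPTY = 0
--     ADD = 1
--     SUB = 2
--     MUL = 3
--     DIV = 4
--
--     @classmethod
--     def get_operator_method(cls, value: int):
--         """演算子に対応した関数を返却
--
--         Args:
--             value (int): 演算子の数値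
--
--         Returns:
--             演算子に対応した関数
--         """
--         operator = {
--             cls.ADD: lambda x, y: x + y,
--             cls.SUB: lambda x, y: x - y,
--             cls.MUL: lambda x, y: x * y,
--             cls.DIV: lambda x, y: x // y,
--         }
--         return operator.get(value)
--
-- def calc_mul_div(vals: list[int], signs: list[int]):
--     """掛け算、割り算の部分の計算処理
--
--     Args:
--         vals (list[int]): 計算する数値
--         signs (list[int]): 演算子を数字で表現したリスト
--
--     Returns:
--         tuple(list[int], list[int]): (数値, 演算子)
--     """
--     new_vals = []
--     new_signs = []
--
--     # 途中経過の値
--     val = vals[0]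
--
--     for i in range(len(signs)):
--         next_val = vals[i + 1]
--
--         if signs[i] in (Operator.MUL, Operator.DIV):
--             operator_method = Operator.get_operator_method(signs[i])
--             val = operator_method(val, next_val)
--         else:
--             new_vals.append(val)
--             new_signs.append(signs[i])
--             val = next_val
--     new_vals.append(val)
--     return (new_vals, new_signs)
-- ===== SOURCE B (Python) =====
-- def _fold_segment(seg_vals, seg_ops):
--     acc = seg_vals[0]
--     for op, v in zip(seg_ops, seg_vals[1:]):
--         acc = acc * v if op == 3 else acc // v
--     return acc
--
--
-- def calc_mul_div(vals, signs):
--     # Phase 1: partition into additive segments (runs joined by MUL/DIV).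
--     segments = []
--     new_signs = []
--     cur_vals = [vals[0]]
--     cur_ops = []
--     for i, s in enumerate(signs):
--         if s in (3, 4):
--             cur_ops.append(s)
--             cur_vals.append(vals[i + 1])
--         else:
--             segments.append((cur_vals, cur_ops))
--             new_signs.append(s)
--             cur_vals = [vals[i + 1]]
--             cur_ops = []
--     segments.append((cur_vals, cur_ops))
--     # Phase 2: fold each segment left-to-right.
--     new_vals = [_fold_segment(sv, so) for sv, so in segments]
--     return (new_vals, new_signs)
-- ===== Notes on version B (the rewrite author's own statement) =====
-- stated objective: alternative
-- what changed: B first partitions the input into additive segments (a list of (values, mul/div ops) runs) in one scan, then independently folds each segment left-to-right in a second phase, instead of A's single loop carrying a running value.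
import Mathlib
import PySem

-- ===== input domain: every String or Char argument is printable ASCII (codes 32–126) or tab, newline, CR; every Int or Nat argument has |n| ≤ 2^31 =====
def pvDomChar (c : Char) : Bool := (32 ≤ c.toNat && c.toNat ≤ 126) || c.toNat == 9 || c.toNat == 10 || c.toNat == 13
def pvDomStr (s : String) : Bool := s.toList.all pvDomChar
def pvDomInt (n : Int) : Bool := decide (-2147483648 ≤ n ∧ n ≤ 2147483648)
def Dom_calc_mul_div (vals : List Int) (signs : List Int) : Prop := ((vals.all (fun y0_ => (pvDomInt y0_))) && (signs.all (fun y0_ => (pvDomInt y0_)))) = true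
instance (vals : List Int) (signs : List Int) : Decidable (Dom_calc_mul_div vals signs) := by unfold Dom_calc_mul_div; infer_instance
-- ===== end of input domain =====

-- B partitions the computation into additive segments in one scan and folds each segment in a second phase (alternative decomposition, same cost).


-- ===== PORT A =====
-- Single loop over the sign indices carrying the running value `val`;
-- pyGetD's default 0 is never reached under Pre_ (Python raises IndexError there).
def calc_mul_div (vals : List Int) (signs : List Int) : List Int × List Int :=
  let st := (PySem.List.pyRange 0 (signs.length : Int) 1).foldl
    (fun (st : List Int × List Int × Int) i =>
      let next_val := PySem.List.pyGetD vals (i + 1) 0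
      let s := PySem.List.pyGetD signs i 0
      if s = 3 ∨ s = 4 then
        (st.1, st.2.1, if s = 3 then st.2.2 * next_val else PySem.Int.floordiv st.2.2 next_val)
      else
        (st.1 ++ [st.2.2], st.2.1 ++ [s], next_val))
    ([], [], PySem.List.pyGetD vals 0 0)
  (st.1 ++ [st.2.2], st.2.1)

-- ===== PORT B =====
-- fold of one segment: seg_vals[0], then each (op, v) of zip(seg_ops, seg_vals[1:]) left-to-right
def foldSegment (segVals : List Int) (segOps : List Int) : Int :=
  (segOps.zip (PySem.List.slice segVals (some 1) none)).foldl
    (fun acc p => if p.1 = 3 then acc * p.2 else PySem.Int.floordiv acc p.2)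
    (PySem.List.pyGetD segVals 0 0)

def calc_mul_div_alt (vals : List Int) (signs : List Int) : List Int × List Int :=
  -- phase 1: partition into segments; state = (segments, new_signs, cur_vals, cur_ops)
  let st := (PySem.List.enumerate signs 0).foldl
    (fun (st : List (List Int × List Int) × List Int × List Int × List Int) p =>
      if p.2 = 3 ∨ p.2 = 4 then
        (st.1, st.2.1, st.2.2.1 ++ [PySem.List.pyGetD vals (p.1 + 1) 0], st.2.2.2 ++ [p.2])
      else
        (st.1 ++ [(st.2.2.1, st.2.2.2)], st.2.1 ++ [p.2],
         [PySem.List.pyGetD vals (p.1 + 1) 0], []))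
    ([], [], [PySem.List.pyGetD vals 0 0], [])
  let segments := st.1 ++ [(st.2.2.1, st.2.2.2)]
  -- phase 2: fold each segment
  (segments.map (fun sg => foldSegment sg.1 sg.2), st.2.1)

-- ===== PRECONDITION & SPEC =====
-- Pre_ excludes exactly the inputs where Python A raises: IndexError when
-- len(vals) < len(signs)+1, and ZeroDivisionError when a DIV sign's right operand vals[i+1] is 0.
def Pre_calc_mul_div (vals : List Int) (signs : List Int) : Prop :=
  signs.length + 1 ≤ vals.length ∧
  ∀ i, i < signs.length → signs.getD i 0 = 4 → vals.getD (i + 1) 0 ≠ 0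

instance (vals : List Int) (signs : List Int) : Decidable (Pre_calc_mul_div vals signs) := by
  unfold Pre_calc_mul_div; infer_instance

def pvWitness_calc_mul_div : List Int × List Int := ([6, 2, 3, 5], [4, 1, 3])

def Spec_calc_mul_div (vals : List Int) (signs : List Int) (out : List Int × List Int) : Prop := out = calc_mul_div_alt vals signs
instance (vals : List Int) (signs : List Int) (out : List Int × List Int) : Decidable (Spec_calc_mul_div vals signs out) := by unfold Spec_calc_mul_div; infer_instance

-- ===== CLAIM (what is proved, stated in full; the proofs are below) =====
def Claim_equal_calc_mul_div : Prop := ∀ (vals : List Int) (signs : List Int), Dom_calc_mul_div vals signs → Pre_calc_mul_div vals signs → Spec_calc_mul_div vals signs (calc_mul_div vals signs)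

-- ===== LEMMAS AND PROOFS =====

-- the loop bodies of the two ports, as named functions over (index, sign) pairs
def pvStepA (vals : List Int) (st : List Int × List Int × Int) (p : Int × Int) :
    List Int × List Int × Int :=
  if p.2 = 3 ∨ p.2 = 4 then
    (st.1, st.2.1,
     if p.2 = 3 then st.2.2 * PySem.List.pyGetD vals (p.1 + 1) 0
     else PySem.Int.floordiv st.2.2 (PySem.List.pyGetD vals (p.1 + 1) 0))
  else (st.1 ++ [st.2.2], st.2.1 ++ [p.2], PySem.List.pyGetD vals (p.1 + 1) 0)

def pvStepB (vals : List Int)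
    (st : List (List Int × List Int) × List Int × List Int × List Int) (p : Int × Int) :
    List (List Int × List Int) × List Int × List Int × List Int :=
  if p.2 = 3 ∨ p.2 = 4 then
    (st.1, st.2.1, st.2.2.1 ++ [PySem.List.pyGetD vals (p.1 + 1) 0], st.2.2.2 ++ [p.2])
  else
    (st.1 ++ [(st.2.2.1, st.2.2.2)], st.2.1 ++ [p.2],
     [PySem.List.pyGetD vals (p.1 + 1) 0], [])

-- A's fold over range(len(signs)) is a fold of pvStepA over enumerate signs 0
theorem pvA_enum (vals signs : List Int) :
    calc_mul_div vals signs =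
      (let st := (PySem.List.enumerate signs 0).foldl (pvStepA vals)
        ([], [], PySem.List.pyGetD vals 0 0)
       (st.1 ++ [st.2.2], st.2.1)) := by
  unfold calc_mul_div
  rw [PySem.List.enumerate_eq_map_pyRange (d := 0), List.foldl_map]
  rfl

theorem pvB_step (vals signs : List Int) :
    calc_mul_div_alt vals signs =
      (let st := (PySem.List.enumerate signs 0).foldl (pvStepB vals)
        ([], [], [PySem.List.pyGetD vals 0 0], [])
       ((st.1 ++ [(st.2.2.1, st.2.2.2)]).map (fun sg => foldSegment sg.1 sg.2), st.2.1)) := rfl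

-- pushing one (op, v) onto a segment extends its fold by one step
theorem pvPushSeg (cvals cops : List Int) (v s : Int)
    (hlen : cops.length + 1 = cvals.length) :
    foldSegment (cvals ++ [v]) (cops ++ [s]) =
      (if s = 3 then foldSegment cvals cops * v
       else PySem.Int.floordiv (foldSegment cvals cops) v) := by
  obtain ⟨v0, vs, rfl⟩ : ∃ v0 vs, cvals = v0 :: vs := by
    cases cvals with
    | nil => simp at hlen
    | cons a l => exact ⟨a, l, rfl⟩
  have hl : cops.length = vs.length := by simpa using hlen
  unfold foldSegment
  rw [PySem.List.slice_from_one, PySem.List.slice_from_one]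
  simp only [List.cons_append, List.tail_cons]
  rw [List.zip_append hl, List.foldl_append]
  simp [PySem.List.pyGetD_zero_cons]

theorem pvFoldSingleton (v : Int) : foldSegment [v] [] = v := by
  simp [foldSegment, PySem.List.slice_from_one, PySem.List.pyGetD_zero_cons]

-- core invariant: A's fold state is the image of B's fold state under segment folding
theorem pvLoop (vals : List Int) :
    ∀ (ps : List (Int × Int)) (segs : List (List Int × List Int)) (nsigns cvals cops : List Int),
    cops.length + 1 = cvals.length →
    ps.foldl (pvStepA vals)
        (segs.map (fun sg => foldSegment sg.1 sg.2), nsigns, foldSegment cvals cops) =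
      (let sb := ps.foldl (pvStepB vals) (segs, nsigns, cvals, cops)
       (sb.1.map (fun sg => foldSegment sg.1 sg.2), sb.2.1, foldSegment sb.2.2.1 sb.2.2.2)) := by
  intro ps
  induction ps with
  | nil => intro segs nsigns cvals cops _; rfl
  | cons p ps ih =>
    intro segs nsigns cvals cops hlen
    simp only [List.foldl_cons]
    by_cases h34 : p.2 = 3 ∨ p.2 = 4
    · have hlen' : (cops ++ [p.2]).length + 1 =
          (cvals ++ [PySem.List.pyGetD vals (p.1 + 1) 0]).length := by
        simp [← hlen]
      have ih' := ih segs nsigns (cvals ++ [PySem.List.pyGetD vals (p.1 + 1) 0])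
        (cops ++ [p.2]) hlen'
      rw [pvPushSeg cvals cops _ p.2 hlen] at ih'
      simp only [pvStepA, pvStepB, h34, if_pos]
      exact ih'
    · have ih' := ih (segs ++ [(cvals, cops)]) (nsigns ++ [p.2])
        [PySem.List.pyGetD vals (p.1 + 1) 0] [] (by simp)
      rw [pvFoldSingleton] at ih'
      simp only [List.map_append, List.map_cons, List.map_nil] at ih'
      simp only [pvStepA, pvStepB, h34, if_neg, not_false_iff]
      exact ih'

-- ===== VERDICT (by name: the statement is the Claim_ definition above) =====
theorem calc_mul_div_spec : Claim_equal_calc_mul_div := by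
  intro vals signs _ _
  unfold Spec_calc_mul_div
  rw [pvA_enum, pvB_step]
  have h := pvLoop vals (PySem.List.enumerate signs 0) [] []
    [PySem.List.pyGetD vals 0 0] [] (by simp)
  rw [pvFoldSingleton] at h
  simp only [List.map_nil] at h
  rw [h]
  simp [List.map_append]
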